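-- pv_equiv track=rewrite | github.com/ArduPilot/ardupilot | libraries/AP_HAL_ChibiOS/hwdef/scripts/bdshot_encoder.py | dshot_encode
-- ===== SOURCE A (Python) =====
-- def dshot_encode(value):
--     packet = (value << 1)
--
--     # compute checksum
--     csum = 0
--     csum_data = packet
--     for i in range(3):
--         csum ^= csum_data
--         csum_data >>= 4
--
--     csum = ~csum
--     csum &= 0xF
--     packet = (packet << 4) | csum
--
--     return packet
-- ===== SOURCE B (Python) =====
-- def dshot_encode(value):
--     packet = value << 1
--     # three running quotient streams, one per nibble of the 12-bit packet;
--     # each checksum bit is the complemented parity of one bit column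
--     q0, q1, q2 = packet, packet // 16, packet // 256
--     csum = 0
--     for weight in (1, 2, 4, 8):
--         if (q0 + q1 + q2) % 2 == 0:
--             csum += weight
--         q0 //= 2
--         q1 //= 2
--         q2 //= 2
--     return (packet << 4) | csum
-- ===== Notes on version B (the rewrite author's own statement) =====
-- stated objective: alternative
-- what changed: Computes the checksum bit-by-bit as the complemented parity of each bit column (three arithmetic quotient streams stepped by //=2, accumulating weighted bits), instead of A's whole-word XOR/shift fold followed by complement-and-mask.
import Mathlib
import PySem

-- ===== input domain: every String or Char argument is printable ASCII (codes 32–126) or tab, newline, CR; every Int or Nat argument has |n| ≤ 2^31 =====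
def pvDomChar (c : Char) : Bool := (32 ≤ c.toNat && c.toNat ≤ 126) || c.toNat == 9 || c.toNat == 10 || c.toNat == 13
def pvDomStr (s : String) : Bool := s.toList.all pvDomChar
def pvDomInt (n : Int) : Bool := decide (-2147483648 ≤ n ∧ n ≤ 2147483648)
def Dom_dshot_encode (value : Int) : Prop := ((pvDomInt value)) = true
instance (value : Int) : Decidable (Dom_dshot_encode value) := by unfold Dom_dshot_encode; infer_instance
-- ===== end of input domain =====

-- B computes the checksum bit-by-bit as the complemented parity of each bit column, maintaining three
-- arithmetic quotient streams, instead of A's whole-word XOR/shift fold then complement-and-mask.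

-- ===== PORT A =====
def dshot_encode (value : Int) : Int :=
  let packet := value <<< 1
  -- csum = 0; csum_data = packet; for i in range(3): csum ^= csum_data; csum_data >>= 4
  let st := (PySem.List.pyRange 0 3 1).foldl
      (fun (st : Int × Int) (_ : Int) => (PySem.Int.bxor st.1 st.2, st.2 >>> (4 : Nat)))
      (0, packet)
  let csum := PySem.Int.band (Int.not st.1) 0xF
  PySem.Int.bor (packet <<< 4) csum

-- ===== PORT B =====
def dshot_encode_alt (value : Int) : Int :=
  let packet := value <<< 1
  -- q0, q1, q2 = packet, packet // 16, packet // 256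
  -- for weight in (1, 2, 4, 8): if (q0+q1+q2) % 2 == 0: csum += weight; q0 //= 2; q1 //= 2; q2 //= 2
  let st := ([1, 2, 4, 8] : List Int).foldl
      (fun (st : Int × Int × Int × Int) (weight : Int) =>
        let csum := if PySem.Int.mod (st.2.1 + st.2.2.1 + st.2.2.2) 2 = 0 then st.1 + weight else st.1
        (csum, PySem.Int.floordiv st.2.1 2, PySem.Int.floordiv st.2.2.1 2, PySem.Int.floordiv st.2.2.2 2))
      (0, packet, PySem.Int.floordiv packet 16, PySem.Int.floordiv packet 256)
  PySem.Int.bor (packet <<< 4) st.1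

-- ===== PRECONDITION & SPEC =====
def Spec_dshot_encode (value : Int) (out : Int) : Prop := out = dshot_encode_alt value
instance (value : Int) (out : Int) : Decidable (Spec_dshot_encode value out) := by unfold Spec_dshot_encode; infer_instance

-- ===== CLAIM (what is proved, stated in full; the proofs are below) =====
def Claim_equal_dshot_encode : Prop := ∀ (value : Int), Dom_dshot_encode value → Spec_dshot_encode value (dshot_encode value)

-- ===== LEMMAS AND PROOFS =====

-- A's checksum in arithmetic form, the %16-reduction pushed onto the three nibble arguments
def pvFA (p : Int) : Int :=
  15 - PySem.Int.bxor (PySem.Int.bxor (p % 16) (p / 16 % 16)) (p / 256 % 16)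

-- B's checksum, the unrolled quotient-stream fold, in ediv form with collapsed divisors
def pvFB (p : Int) : Int :=
  (if 2 ∣ (p + p / 16 + p / 256) then (1:Int) else 0)
  + (if 2 ∣ (p / 2 + p / 32 + p / 512) then 2 else 0)
  + (if 2 ∣ (p / 4 + p / 64 + p / 1024) then 4 else 0)
  + (if 2 ∣ (p / 8 + p / 128 + p / 2048) then 8 else 0)

theorem nat_and15 (n : Nat) : n &&& 15 = n % 16 := by
  apply Nat.eq_of_testBit_eq
  intro i
  have h16 : (16:Nat) = 2 ^ 4 := by norm_num
  rw [h16, Nat.testBit_mod_two_pow, Nat.testBit_and]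
  have h15 : (15:Nat) = 2 ^ 4 - 1 := by norm_num
  rw [h15, Nat.testBit_two_pow_sub_one]
  by_cases h : i < 4 <;> simp [h, Bool.and_comm]

theorem nat_xor_mod16 (a b : Nat) : (a ^^^ b) % 16 = (a % 16) ^^^ (b % 16) := by
  apply Nat.eq_of_testBit_eq
  intro i
  have h16 : (16:Nat) = 2 ^ 4 := by norm_num
  rw [h16, Nat.testBit_mod_two_pow, Nat.testBit_xor, Nat.testBit_xor,
      Nat.testBit_mod_two_pow, Nat.testBit_mod_two_pow]
  by_cases h : i < 4 <;> simp [h]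

theorem nat_xor_compl16 : ∀ x < 16, ∀ y < 16, (x : Nat) ^^^ (15 - y) = 15 - (x ^^^ y) := by decide
theorem nat_compl_compl16 : ∀ x < 16, ∀ y < 16, ((15 - x : Nat)) ^^^ (15 - y) = x ^^^ y := by decide

theorem negSucc_mod16 (m : Nat) : Int.negSucc m % 16 = ((15 - m % 16 : Nat) : Int) := by
  have h3 : Int.negSucc m = -(m : Int) - 1 := by omega
  have h4 : ((m : Int)) % 16 = ((m % 16 : Nat) : Int) := by push_cast; rfl
  have h5 : m % 16 < 16 := Nat.mod_lt _ (by norm_num)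
  omega

theorem natCast_mod16 (n : Nat) : ((n : Int)) % 16 = ((n % 16 : Nat) : Int) := by push_cast; rfl

-- complement-and-mask is arithmetic: ~y & 0xF = 15 - y % 16
theorem band_not_fifteen (y : Int) : PySem.Int.band (Int.not y) 15 = 15 - y % 16 := by
  have e1 : Int.toNat 15 = 15 := rfl
  cases y with
  | ofNat n =>
      show PySem.Int.band (Int.negSucc n) 15 = _
      have hneg : ¬ (0:Int) ≤ Int.negSucc n := by omega
      simp only [PySem.Int.band, hneg, if_false, if_pos (by norm_num : (0:Int) ≤ 15)]
      have h : (-Int.negSucc n - 1) = (n : Int) := by omega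
      rw [h]
      simp only [e1, Int.toNat_natCast]
      rw [Nat.and_comm, nat_and15]
      have h3 : ((n:Int)) % 16 = ((n % 16 : Nat) : Int) := natCast_mod16 n
      have h4 : Int.ofNat n = (n : Int) := rfl
      have h5 : n % 16 < 16 := Nat.mod_lt _ (by norm_num)
      omega
  | negSucc m =>
      show PySem.Int.band (Int.ofNat m) 15 = _
      have hpos : (0:Int) ≤ Int.ofNat m := Int.natCast_nonneg m
      simp only [PySem.Int.band, if_pos hpos, if_pos (by norm_num : (0:Int) ≤ 15), e1]
      have e2 : (Int.ofNat m).toNat = m := rfl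
      rw [e2, nat_and15]
      have h3 : Int.negSucc m = -(m : Int) - 1 := by omega
      have h4 : ((m : Int)) % 16 = ((m % 16 : Nat) : Int) := natCast_mod16 m
      have h5 : m % 16 < 16 := Nat.mod_lt _ (by norm_num)
      omega

theorem bxor_mod16_mixed (n m : Nat) :
    PySem.Int.bxor (n : Int) (Int.negSucc m) % 16 =
    PySem.Int.bxor ((n : Int) % 16) (Int.negSucc m % 16) := by
  have hx : PySem.Int.bxor (n : Int) (Int.negSucc m) = -((n ^^^ m : Nat) : Int) - 1 := by
    simp only [PySem.Int.bxor, if_pos (Int.natCast_nonneg n)]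
    have h : (-Int.negSucc m - 1) = (m : Int) := by omega
    rw [h]
    simp [Int.toNat_natCast]
  rw [hx, natCast_mod16, negSucc_mod16, PySem.Int.bxor_natCast,
    nat_xor_compl16 _ (Nat.mod_lt _ (by norm_num)) _ (Nat.mod_lt _ (by norm_num)),
    ← nat_xor_mod16]
  have h5 : (n ^^^ m) % 16 < 16 := Nat.mod_lt _ (by norm_num)
  have h6 : (((n ^^^ m : Nat)) : Int) % 16 = (((n ^^^ m) % 16 : Nat) : Int) := natCast_mod16 _
  omega

-- the low nibble of a xor depends only on the low nibbles
theorem bxor_mod16 (a b : Int) : PySem.Int.bxor a b % 16 = PySem.Int.bxor (a % 16) (b % 16) := by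
  cases a with
  | ofNat n₁ =>
    cases b with
    | ofNat n₂ =>
        show PySem.Int.bxor (n₁ : Int) (n₂ : Int) % 16 =
          PySem.Int.bxor ((n₁ : Int) % 16) ((n₂ : Int) % 16)
        rw [PySem.Int.bxor_natCast, natCast_mod16, natCast_mod16, natCast_mod16,
          PySem.Int.bxor_natCast, ← nat_xor_mod16]
    | negSucc m₂ =>
        exact bxor_mod16_mixed n₁ m₂
  | negSucc m₁ =>
    cases b with
    | ofNat n₂ =>
        show PySem.Int.bxor (Int.negSucc m₁) (n₂ : Int) % 16 =
          PySem.Int.bxor (Int.negSucc m₁ % 16) ((n₂ : Int) % 16)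
        rw [PySem.Int.bxor_comm, bxor_mod16_mixed, PySem.Int.bxor_comm]
    | negSucc m₂ =>
        have hx : PySem.Int.bxor (Int.negSucc m₁) (Int.negSucc m₂) = ((m₁ ^^^ m₂ : Nat) : Int) := by
          simp only [PySem.Int.bxor]
          have h1 : (-Int.negSucc m₁ - 1) = (m₁ : Int) := by omega
          have h2 : (-Int.negSucc m₂ - 1) = (m₂ : Int) := by omega
          rw [h1, h2]
          simp [Int.toNat_natCast]
        rw [hx, natCast_mod16, negSucc_mod16, negSucc_mod16, PySem.Int.bxor_natCast,
          nat_compl_compl16 _ (Nat.mod_lt _ (by norm_num)) _ (Nat.mod_lt _ (by norm_num)),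
          ← nat_xor_mod16]

theorem bxor_zero_left (a : Int) : PySem.Int.bxor 0 a = a := by
  rw [PySem.Int.bxor_comm]; exact PySem.Int.bxor_zero a

-- the two checksum forms agree on one period of the packet, checked in eight chunks
set_option maxRecDepth 4000 in
theorem pvB0 : ∀ n : Nat, n < 512 → pvFA ((0 + n : Nat) : Int) = pvFB ((0 + n : Nat) : Int) := by decide
set_option maxRecDepth 4000 in
theorem pvB1 : ∀ n : Nat, n < 512 → pvFA ((512 + n : Nat) : Int) = pvFB ((512 + n : Nat) : Int) := by decide
set_option maxRecDepth 4000 in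
theorem pvB2 : ∀ n : Nat, n < 512 → pvFA ((1024 + n : Nat) : Int) = pvFB ((1024 + n : Nat) : Int) := by decide
set_option maxRecDepth 4000 in
theorem pvB3 : ∀ n : Nat, n < 512 → pvFA ((1536 + n : Nat) : Int) = pvFB ((1536 + n : Nat) : Int) := by decide
set_option maxRecDepth 4000 in
theorem pvB4 : ∀ n : Nat, n < 512 → pvFA ((2048 + n : Nat) : Int) = pvFB ((2048 + n : Nat) : Int) := by decide
set_option maxRecDepth 4000 in
theorem pvB5 : ∀ n : Nat, n < 512 → pvFA ((2560 + n : Nat) : Int) = pvFB ((2560 + n : Nat) : Int) := by decide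
set_option maxRecDepth 4000 in
theorem pvB6 : ∀ n : Nat, n < 512 → pvFA ((3072 + n : Nat) : Int) = pvFB ((3072 + n : Nat) : Int) := by decide
set_option maxRecDepth 4000 in
theorem pvB7 : ∀ n : Nat, n < 512 → pvFA ((3584 + n : Nat) : Int) = pvFB ((3584 + n : Nat) : Int) := by decide
theorem pvBridge : ∀ n : Nat, n < 4096 → pvFA (n : Int) = pvFB (n : Int) := by
  intro n hn
  by_cases h0 : n < 512
  · have h := pvB0 (n - 0) (by omega)
    have e : 0 + (n - 0) = n := by omega
    rw [e] at h; exact h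
  by_cases h1 : n < 1024
  · have h := pvB1 (n - 512) (by omega)
    have e : 512 + (n - 512) = n := by omega
    rw [e] at h; exact h
  by_cases h2 : n < 1536
  · have h := pvB2 (n - 1024) (by omega)
    have e : 1024 + (n - 1024) = n := by omega
    rw [e] at h; exact h
  by_cases h3 : n < 2048
  · have h := pvB3 (n - 1536) (by omega)
    have e : 1536 + (n - 1536) = n := by omega
    rw [e] at h; exact h
  by_cases h4 : n < 2560
  · have h := pvB4 (n - 2048) (by omega)
    have e : 2048 + (n - 2048) = n := by omega
    rw [e] at h; exact h
  by_cases h5 : n < 3072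
  · have h := pvB5 (n - 2560) (by omega)
    have e : 2560 + (n - 2560) = n := by omega
    rw [e] at h; exact h
  by_cases h6 : n < 3584
  · have h := pvB6 (n - 3072) (by omega)
    have e : 3072 + (n - 3072) = n := by omega
    rw [e] at h; exact h
  by_cases h7 : n < 4096
  · have h := pvB7 (n - 3584) (by omega)
    have e : 3584 + (n - 3584) = n := by omega
    rw [e] at h; exact h
  omega


-- A's masked checksum equals pvFA
theorem csumA_eq (p : Int) :
    PySem.Int.band (Int.not (PySem.Int.bxor (PySem.Int.bxor p (p / 16)) (p / 256))) 15 = pvFA p := by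
  rw [band_not_fifteen, bxor_mod16, bxor_mod16, pvFA]

-- both checksum forms only depend on p mod 4096
theorem pvFA_period (p : Int) : pvFA p = pvFA (p % 4096) := by
  unfold pvFA
  have e1 : p % 16 = p % 4096 % 16 := by omega
  have e2 : p / 16 % 16 = p % 4096 / 16 % 16 := by omega
  have e3 : p / 256 % 16 = p % 4096 / 256 % 16 := by omega
  rw [e1, e2, e3]

theorem pvFB_arith (p : Int) : pvFB p =
    1 * (1 - (p + p / 16 + p / 256) % 2)
    + 2 * (1 - (p / 2 + p / 32 + p / 512) % 2)
    + 4 * (1 - (p / 4 + p / 64 + p / 1024) % 2)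
    + 8 * (1 - (p / 8 + p / 128 + p / 2048) % 2) := by
  unfold pvFB
  split_ifs <;> omega

theorem pvFB_period (p : Int) : pvFB p = pvFB (p % 4096) := by
  have e1 : (p + p / 16 + p / 256) % 2 = (p % 4096 + p % 4096 / 16 + p % 4096 / 256) % 2 := by omega
  have e2 : (p / 2 + p / 32 + p / 512) % 2 = (p % 4096 / 2 + p % 4096 / 32 + p % 4096 / 512) % 2 := by omega
  have e3 : (p / 4 + p / 64 + p / 1024) % 2 = (p % 4096 / 4 + p % 4096 / 64 + p % 4096 / 1024) % 2 := by omega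
  have e4 : (p / 8 + p / 128 + p / 2048) % 2 = (p % 4096 / 8 + p % 4096 / 128 + p % 4096 / 2048) % 2 := by omega
  rw [pvFB_arith, pvFB_arith, e1, e2, e3, e4]

theorem pvFA_eq_pvFB (p : Int) : pvFA p = pvFB p := by
  rw [pvFA_period, pvFB_period]
  have h0 : 0 ≤ p % 4096 := Int.emod_nonneg p (by norm_num)
  have h1 : p % 4096 < 4096 := Int.emod_lt_of_pos p (by norm_num)
  have := pvBridge (p % 4096).toNat (by omega)
  rwa [Int.toNat_of_nonneg h0] at this

-- ===== VERDICT (by name: the statement is the Claim_ definition above) =====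
theorem dshot_encode_spec : Claim_equal_dshot_encode := by
  intro value _
  unfold Spec_dshot_encode dshot_encode dshot_encode_alt
  generalize (value <<< 1 : Int) = p
  have hf2 : ∀ a : Int, PySem.Int.floordiv a 2 = a / 2 := fun a =>
    PySem.Int.floordiv_eq_ediv_of_pos (by norm_num)
  have hf16 : ∀ a : Int, PySem.Int.floordiv a 16 = a / 16 := fun a =>
    PySem.Int.floordiv_eq_ediv_of_pos (by norm_num)
  have hf256 : ∀ a : Int, PySem.Int.floordiv a 256 = a / 256 := fun a =>
    PySem.Int.floordiv_eq_ediv_of_pos (by norm_num)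
  have hm2 : ∀ a : Int, PySem.Int.mod a 2 = a % 2 := fun a =>
    PySem.Int.mod_eq_emod_of_pos (by norm_num)
  have hs4 : ∀ a : Int, a >>> (4 : Nat) = a / 16 := fun a => by
    simpa using Int.shiftRight_eq_div_pow a 4
  have hzx : ∀ a : Int, PySem.Int.bxor 0 a = a := bxor_zero_left
  have hdd : p / 16 / 16 = p / 256 := by omega
  have ht : (3 : Int).toNat = 3 := rfl
  have c1 : p / 2 / 2 = p / 4 := by omega
  have c2 : p / 4 / 2 = p / 8 := by omega
  have c3 : p / 16 / 2 = p / 32 := by omega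
  have c4 : p / 32 / 2 = p / 64 := by omega
  have c5 : p / 64 / 2 = p / 128 := by omega
  have c6 : p / 256 / 2 = p / 512 := by omega
  have c7 : p / 512 / 2 = p / 1024 := by omega
  have c8 : p / 1024 / 2 = p / 2048 := by omega
  norm_num [PySem.List.pyRange, List.foldl, List.range_succ, List.map_cons, List.map_nil, ht, hf2, hf16, hf256, hm2, hs4, hzx,
    hdd, c1, c2, c3, c4, c5, c6, c7, c8]
  rw [csumA_eq, pvFA_eq_pvFB]
  unfold pvFB
  split_ifs <;> norm_num
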